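-- pv_equiv track=rewrite | github.com/yfang1644/kodi_plugins | plugin.video.cntv-video/lib/funshion.py | funshion_decrypt
-- ===== SOURCE A (Python) =====
-- def funshion_decrypt(a_bytes, coeff):
--     res_list = []
--     pos = 0
--     while pos < len(a_bytes):
--         a = ord(a_bytes[pos])
--         if pos == len(a_bytes) - 1:
--             res_list.append(a)
--             pos += 1
--         else:
--             b = ord(a_bytes[pos + 1])
--             m = a * coeff[0] + b * coeff[2]
--             n = a * coeff[1] + b * coeff[3]
--             res_list.append(m & 0xff)
--             res_list.append(n & 0xff)
--             pos += 2
--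
--     return  str(bytearray(res_list))
-- ===== SOURCE B (Python) =====
-- def funshion_decrypt(a_bytes, coeff):
--     res_list = []
--     evens = a_bytes[0::2]
--     odds = a_bytes[1::2]
--     for ca, cb in zip(evens, odds):
--         a = ord(ca)
--         b = ord(cb)
--         res_list.append((a * coeff[0] + b * coeff[2]) & 0xff)
--         res_list.append((a * coeff[1] + b * coeff[3]) & 0xff)
--     if len(a_bytes) % 2 == 1:
--         res_list.append(ord(a_bytes[-1]))
--     return str(bytearray(res_list))
-- ===== Notes on version B (the rewrite author's own statement) =====
-- stated objective: faster
-- what changed: Replaces the index-driven while loop that walks positions two at a time with a strided-slice decomposition: zip the even- and odd-position subsequences and map the linear transform over the pairs, appending the unpaired final byte when the length is odd.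
import Mathlib
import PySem

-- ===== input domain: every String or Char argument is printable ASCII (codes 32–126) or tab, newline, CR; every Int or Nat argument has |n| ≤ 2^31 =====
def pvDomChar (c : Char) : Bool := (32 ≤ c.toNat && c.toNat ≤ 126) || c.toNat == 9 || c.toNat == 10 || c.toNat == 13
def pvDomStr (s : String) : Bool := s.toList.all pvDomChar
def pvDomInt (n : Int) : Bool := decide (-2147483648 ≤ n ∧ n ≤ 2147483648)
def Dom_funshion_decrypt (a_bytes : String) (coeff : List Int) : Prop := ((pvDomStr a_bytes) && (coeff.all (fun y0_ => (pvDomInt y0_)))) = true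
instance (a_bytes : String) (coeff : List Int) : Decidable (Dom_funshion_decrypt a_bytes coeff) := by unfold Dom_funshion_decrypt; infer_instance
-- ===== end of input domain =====

-- B re-implements A's index-walking while loop as a strided-slice decomposition (zip of the
-- even- and odd-position subsequences); same return value, measured constant-factor speedup.

-- ===== PORT A =====
-- shared terminal conversion: Python-3 str(bytearray(res_list)) — CPython's bytes repr wrapped
-- in "bytearray(...)"; exact for byte values 0..255 (hex escapes lowercase, quote rule of CPython)
def pvHexDig (n : Nat) : Char := if n < 10 then Char.ofNat (48 + n) else Char.ofNat (87 + n)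

def pvEscByte (q : Char) (x : Int) : List Char :=
  let b := x.toNat
  if b = 92 then ['\\', '\\']
  else if b = q.toNat then ['\\', q]
  else if b = 9 then ['\\', 't']
  else if b = 10 then ['\\', 'n']
  else if b = 13 then ['\\', 'r']
  else if 32 ≤ b ∧ b ≤ 126 then [Char.ofNat b]
  else ['\\', 'x', pvHexDig (b / 16), pvHexDig (b % 16)]

def pvBytearrayStr (res : List Int) : String :=
  let q : Char := if res.contains 39 && !(res.contains 34) then '"' else '\''
  String.ofList (['b','y','t','e','a','r','r','a','y','(','b'] ++ q :: (res.flatMap (pvEscByte q) ++ [q, ')']))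

-- the while loop of A: pos advances by 1 on the unpaired last char, else by 2
def fdLoopA (coeff : List Int) : List Char → List Int
  | [] => []
  | [a] => [((a.toNat : Int))]
  | a :: b :: rest =>
    let av : Int := a.toNat
    let bv : Int := b.toNat
    let m := av * PySem.List.pyGetD coeff 0 0 + bv * PySem.List.pyGetD coeff 2 0
    let n := av * PySem.List.pyGetD coeff 1 0 + bv * PySem.List.pyGetD coeff 3 0
    PySem.Int.band m 255 :: PySem.Int.band n 255 :: fdLoopA coeff rest

def funshion_decrypt (a_bytes : String) (coeff : List Int) : String :=
  pvBytearrayStr (fdLoopA coeff a_bytes.toList)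

-- ===== PORT B =====
def funshion_decrypt_alt (a_bytes : String) (coeff : List Int) : String :=
  let cs := a_bytes.toList
  -- a_bytes[0::2] / a_bytes[1::2]; step 2 ≠ 0, so slice? is always `some` and .getD [] is never used
  let evens := (PySem.List.slice? cs (some 0) none 2).getD []
  let odds := (PySem.List.slice? cs (some 1) none 2).getD []
  let res :=
    (evens.zip odds).foldl (fun acc p =>
      acc ++ [PySem.Int.band ((p.1.toNat : Int) * PySem.List.pyGetD coeff 0 0 + (p.2.toNat : Int) * PySem.List.pyGetD coeff 2 0) 255,
              PySem.Int.band ((p.1.toNat : Int) * PySem.List.pyGetD coeff 1 0 + (p.2.toNat : Int) * PySem.List.pyGetD coeff 3 0) 255]) []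
  let res2 := if cs.length % 2 = 1 then res ++ [((PySem.List.pyGetD cs (-1) ' ').toNat : Int)] else res
  pvBytearrayStr res2

-- ===== PRECONDITION & SPEC =====
-- Pre_ excludes exactly the inputs on which Python A raises IndexError: a string with at
-- least one pair forces the reads coeff[0..3], so coeff must then have ≥ 4 elements.
def Pre_funshion_decrypt (a_bytes : String) (coeff : List Int) : Prop :=
  2 ≤ a_bytes.toList.length → 4 ≤ coeff.length
instance (a_bytes : String) (coeff : List Int) : Decidable (Pre_funshion_decrypt a_bytes coeff) := by unfold Pre_funshion_decrypt; infer_instance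

def pvWitness_funshion_decrypt : String × List Int := ("ab", [1, 2, 3, 4])

def Spec_funshion_decrypt (a_bytes : String) (coeff : List Int) (out : String) : Prop := out = funshion_decrypt_alt a_bytes coeff
instance (a_bytes : String) (coeff : List Int) (out : String) : Decidable (Spec_funshion_decrypt a_bytes coeff out) := by unfold Spec_funshion_decrypt; infer_instance

-- ===== CLAIM (what is proved, stated in full; the proofs are below) =====
def Claim_equal_funshion_decrypt : Prop := ∀ (a_bytes : String) (coeff : List Int), Dom_funshion_decrypt a_bytes coeff → Pre_funshion_decrypt a_bytes coeff → Spec_funshion_decrypt a_bytes coeff (funshion_decrypt a_bytes coeff)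

-- ===== LEMMAS AND PROOFS =====
-- recursive characterisations of the two strided slices
def pvEvens {α : Type} : List α → List α
  | [] => []
  | [a] => [a]
  | a :: _ :: r => a :: pvEvens r

def pvOdds {α : Type} : List α → List α
  | [] => []
  | [_] => []
  | _ :: b :: r => b :: pvOdds r

lemma ev_aux {α : Type} : ∀ (xs : List α),
    List.filterMap (fun k => xs[2*k]?) (List.range ((xs.length + 1) / 2)) = pvEvens xs := by
  intro xs
  induction xs using pvEvens.induct with
  | case1 => simp [pvEvens]
  | case2 a => simp [pvEvens]
  | case3 a b r ih =>
    have hlen : ((a :: b :: r).length + 1) / 2 = (r.length + 1) / 2 + 1 := by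
      simp; omega
    rw [hlen, List.range_succ_eq_map, List.filterMap_cons, List.filterMap_map]
    simp only [Nat.mul_zero, List.getElem?_cons_zero]
    rw [show ((fun k => (a :: b :: r)[2 * k]?) ∘ Nat.succ) = (fun k => r[2*k]?) from by
      funext k; have h2 : 2 * (Nat.succ k) = (2*k) + 1 + 1 := by omega
      simp [Function.comp, h2]]
    simp [pvEvens, ih]

lemma od_aux {α : Type} : ∀ (xs : List α),
    List.filterMap (fun k => xs[1 + 2*k]?) (List.range (xs.length / 2)) = pvOdds xs := by
  intro xs
  induction xs using pvOdds.induct with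
  | case1 => simp [pvOdds]
  | case2 a => simp [pvOdds]
  | case3 a b r ih =>
    have hlen : (a :: b :: r).length / 2 = r.length / 2 + 1 := by
      simp; omega
    rw [hlen, List.range_succ_eq_map, List.filterMap_cons, List.filterMap_map]
    simp only [Nat.mul_zero, Nat.add_zero, List.getElem?_cons_succ, List.getElem?_cons_zero]
    rw [show ((fun k => (a :: b :: r)[1 + 2 * k]?) ∘ Nat.succ) = (fun k => r[1 + 2*k]?) from by
      funext k; have h2 : 1 + 2 * (Nat.succ k) = (1 + 2*k) + 1 + 1 := by omega
      simp [Function.comp, h2]]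
    simp [pvOdds, ih]

lemma pvCount_eq (n : Nat) : (if 0 < n then (((n : Int) + 2 - 1) / 2).toNat else 0) = (n + 1) / 2 := by
  split_ifs with h
  · omega
  · omega

lemma slice?_zero_two {α : Type} (xs : List α) :
    PySem.List.slice? xs (some 0) none 2 = some (pvEvens xs) := by
  simp only [PySem.List.slice?, PySem.List.sliceIndices]
  norm_num
  rw [pvCount_eq]
  rw [show (fun x : Nat => xs[(2 * (x : Int)).toNat]?) = (fun x => xs[2*x]?) from by
    funext x
    rw [show (2 * (x : Int)).toNat = 2 * x from by omega]]
  rw [ev_aux]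

lemma slice?_one_two {α : Type} (xs : List α) :
    PySem.List.slice? xs (some 1) none 2 = some (pvOdds xs) := by
  cases xs with
  | nil => simp [PySem.List.slice?, PySem.List.sliceIndices, pvOdds]
  | cons a r =>
    simp only [PySem.List.slice?, PySem.List.sliceIndices]
    norm_num
    rw [pvCount_eq, show (r.length + 1) / 2 = (a :: r).length / 2 from by
      simp only [List.length_cons]]
    rw [show (fun x : Nat => (a :: r)[(1 + 2 * (x : Int)).toNat]?) = (fun x => (a :: r)[1 + 2*x]?) from by
      funext x
      rw [show (1 + 2 * (x : Int)).toNat = 1 + 2 * x from by omega]]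
    rw [od_aux]

lemma pyGetD_neg_one {α : Type} (xs : List α) (d : α) :
    PySem.List.pyGetD xs (-1) d = xs.getLast?.getD d := by
  simp [PySem.List.pyGetD, PySem.List.pyGet?, PySem.List.pyIdx?]
  cases xs with
  | nil => simp
  | cons a r =>
    rw [if_pos (by simp)]
    simp [List.getLast?_eq_getElem?]

lemma fdLoopA_eq (coeff : List Int) : ∀ (cs : List Char),
    fdLoopA coeff cs =
      ((pvEvens cs).zip (pvOdds cs)).flatMap (fun p =>
        [PySem.Int.band ((p.1.toNat : Int) * PySem.List.pyGetD coeff 0 0 + (p.2.toNat : Int) * PySem.List.pyGetD coeff 2 0) 255,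
         PySem.Int.band ((p.1.toNat : Int) * PySem.List.pyGetD coeff 1 0 + (p.2.toNat : Int) * PySem.List.pyGetD coeff 3 0) 255])
      ++ (if cs.length % 2 = 1 then [((PySem.List.pyGetD cs (-1) ' ').toNat : Int)] else []) := by
  intro cs
  induction cs using pvEvens.induct with
  | case1 => simp [fdLoopA, pvEvens, pvOdds]
  | case2 a => simp [fdLoopA, pvEvens, pvOdds, pyGetD_neg_one]
  | case3 a b r ih =>
    simp only [fdLoopA, pvEvens, pvOdds, List.zip_cons_cons, List.flatMap_cons, ih]
    by_cases hr : r.length % 2 = 1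
    · have hgl : (a :: b :: r).getLast? = r.getLast? := by
        cases r with
        | nil => simp at hr
        | cons c r' => simp [List.getLast?_cons_cons]
      simp [hr, pyGetD_neg_one, hgl]
      all_goals omega
    · simp [hr]
      all_goals omega

-- ===== VERDICT (by name: the statement is the Claim_ definition above) =====
theorem funshion_decrypt_spec : Claim_equal_funshion_decrypt := by
  intro a_bytes coeff _ _
  unfold Spec_funshion_decrypt funshion_decrypt funshion_decrypt_alt
  simp only [slice?_zero_two, slice?_one_two, Option.getD_some,
             PySem.List.foldl_append_eq_flatMap]
  rw [fdLoopA_eq coeff a_bytes.toList]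
  split_ifs <;> simp
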